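-- pv_equiv track=rewrite | github.com/Adityajha0808/specwatch-platform | specwatch/discovery/source_resolver.py | rank_sources
-- ===== SOURCE A (Python) =====
-- def rank_sources(urls):
--
--     scored = []
--
--     for url in urls:
--
--         score = 0
--
--         if "docs" in url:
--             score += 3
--
--         if "github" in url:
--             score += 2
--
--         if "api" in url:
--             score += 1
--
--         scored.append((url, score))
--
--     scored.sort(key=lambda x: x[1], reverse=True)
--
--     return [u[0] for u in scored]
-- ===== SOURCE B (Python) =====
-- def rank_sources(urls):
--     # Bucket pass over the bounded score range 6..0 instead of sorting.
--     def score(u):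
--         return (3 if "docs" in u else 0) + (2 if "github" in u else 0) + (1 if "api" in u else 0)
--     out = []
--     for s in range(6, -1, -1):
--         out.extend(u for u in urls if score(u) == s)
--     return out
-- ===== Notes on version B (the rewrite author's own statement) =====
-- stated objective: alternative
-- what changed: Replaces build-pairs-then-stable-sort with a sort-free bucket pass: scores lie in 0..6, so the result is the urls with score 6, then 5, ..., then 0, each group in input order.
import Mathlib
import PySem

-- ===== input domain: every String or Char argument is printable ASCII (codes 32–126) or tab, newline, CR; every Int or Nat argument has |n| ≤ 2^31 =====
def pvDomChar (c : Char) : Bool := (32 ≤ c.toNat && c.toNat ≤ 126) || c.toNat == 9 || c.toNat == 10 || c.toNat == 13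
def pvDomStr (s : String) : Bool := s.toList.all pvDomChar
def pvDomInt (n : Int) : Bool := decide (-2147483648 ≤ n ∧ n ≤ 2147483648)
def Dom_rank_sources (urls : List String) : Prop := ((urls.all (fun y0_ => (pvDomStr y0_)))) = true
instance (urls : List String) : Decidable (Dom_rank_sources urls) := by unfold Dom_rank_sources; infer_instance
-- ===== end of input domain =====

-- B replaces build-pairs-then-stable-sort by a sort-free bucket pass over the bounded score range 6..0 (alternative algorithm, return value proved equal).


-- ===== PORT A =====
def rank_sources (urls : List String) : List String :=
  let scored := urls.foldl (fun scored url =>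
      let score : Int := 0
      let score := if PySem.Str.isIn "docs" url then score + 3 else score
      let score := if PySem.Str.isIn "github" url then score + 2 else score
      let score := if PySem.Str.isIn "api" url then score + 1 else score
      scored ++ [(url, score)]) []
  (PySem.List.sorted scored (fun x => x.2) true).map (fun u => u.1)

-- ===== PORT B =====
def altScore (u : String) : Int :=
  (if PySem.Str.isIn "docs" u then 3 else 0)
  + (if PySem.Str.isIn "github" u then 2 else 0)
  + (if PySem.Str.isIn "api" u then 1 else 0)

def rank_sources_alt (urls : List String) : List String :=
  (PySem.List.pyRange 6 (-1) (-1)).foldl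
    (fun out s => out ++ urls.filter (fun u => altScore u == s)) []

-- ===== PRECONDITION & SPEC =====
def Spec_rank_sources (urls : List String) (out : List String) : Prop := out = rank_sources_alt urls
instance (urls : List String) (out : List String) : Decidable (Spec_rank_sources urls out) := by unfold Spec_rank_sources; infer_instance

-- ===== CLAIM (what is proved, stated in full; the proofs are below) =====
def Claim_equal_rank_sources : Prop := ∀ (urls : List String), Dom_rank_sources urls → Spec_rank_sources urls (rank_sources urls)

-- ===== LEMMAS AND PROOFS =====

-- the pair builder A's loop appends
def rsPair (u : String) : String × Int := (u, altScore u)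

theorem insertBy_append_of_not_before {α : Type} (before : α → α → Bool) (x : α)
    (l1 l2 : List α) (h : ∀ b ∈ l1, before x b = false) :
    PySem.List.insertBy before x (l1 ++ l2) = l1 ++ PySem.List.insertBy before x l2 := by
  induction l1 with
  | nil => simp
  | cons y ys ih =>
      simp only [List.cons_append, PySem.List.insertBy, h y (by simp)]
      simp only [Bool.false_eq_true, if_false, List.cons.injEq, true_and]
      exact ih (fun b hb => h b (by simp [hb]))

theorem insertBy_cons_of_all_before {α : Type} (before : α → α → Bool) (x : α)
    (l : List α) (h : ∀ b ∈ l, before x b = true) :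
    PySem.List.insertBy before x l = x :: l := by
  cases l with
  | nil => rfl
  | cons y ys => simp [PySem.List.insertBy, h y (by simp)]

-- inserting an element of key k into a concatenation of key-homogeneous buckets
-- listed in strictly descending key order appends it to bucket k
theorem insertBy_flatMap_buckets (k : Int) (x : String × Int) (hx : x.2 = k)
    (sl : List Int) (hp : sl.Pairwise (· > ·)) (hk : k ∈ sl)
    (bucket : Int → List (String × Int)) (hb : ∀ s, ∀ b ∈ bucket s, b.2 = s) :
    PySem.List.insertBy (fun a b => decide (b.2 < a.2)) x (sl.flatMap bucket)
      = sl.flatMap (fun s => bucket s ++ if s = k then [x] else []) := by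
  induction sl with
  | nil => simp at hk
  | cons s rest ih =>
      rcases List.pairwise_cons.mp hp with ⟨hs, hrest⟩
      by_cases hsk : s = k
      · subst hsk
        have hlt : ∀ b ∈ rest.flatMap bucket, b.2 < s := by
          intro b hbmem
          rcases List.mem_flatMap.mp hbmem with ⟨t, ht, hbt⟩
          rw [hb t b hbt]; exact hs t ht
        rw [List.flatMap_cons,
          insertBy_append_of_not_before _ _ _ _ (by
            intro b hbmem; simp [hb s b hbmem, hx]),
          insertBy_cons_of_all_before _ _ _ (by
            intro b hbmem; simp [hx]; exact hlt b hbmem)]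
        have hrest_eq : rest.flatMap (fun t => bucket t ++ if t = s then [x] else [])
            = rest.flatMap bucket := by
          apply List.flatMap_congr
          intro t ht
          have : t ≠ s := by have := hs t ht; omega
          simp [this]
        simp [List.flatMap_cons, hrest_eq]
      · have hkrest : k ∈ rest := by cases hk with
          | head => exact absurd rfl hsk
          | tail _ h => exact h
        have hsgtk : k < s := hs k hkrest
        rw [List.flatMap_cons,
          insertBy_append_of_not_before _ _ _ _ (by
            intro b hbmem; simp [hb s b hbmem, hx]; omega),
          ih hrest hkrest]
        simp [List.flatMap_cons, hsk]

-- the stable reverse sort of the scored pairs is the descending bucket concatenation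
theorem sorted_eq_buckets (urls : List String) :
    PySem.List.sorted (urls.map rsPair) (fun x => x.2) true
      = ([6, 5, 4, 3, 2, 1, 0] : List Int).flatMap
          (fun s => (urls.filter (fun u => altScore u == s)).map rsPair) := by
  rw [PySem.List.sorted_rev_eq_foldl_insertBy]
  induction urls using List.reverseRecOn with
  | nil => simp
  | append_singleton xs x ih =>
      rw [List.map_append, List.foldl_append]
      simp only [List.map_cons, List.map_nil, List.foldl_cons, List.foldl_nil]
      rw [ih]
      have hrange : altScore x ∈ ([6, 5, 4, 3, 2, 1, 0] : List Int) := by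
        simp [altScore]; split_ifs <;> omega
      rw [insertBy_flatMap_buckets (altScore x) (rsPair x) rfl _
        (by decide) hrange _
        (by intro s b hb
            rcases List.mem_map.mp hb with ⟨u, hu, rfl⟩
            have := (List.mem_filter.mp hu).2
            simpa [rsPair] using (beq_iff_eq.mp this))]
      apply List.flatMap_congr
      intro s _
      by_cases hsx : altScore x = s
      · simp [List.filter_append, hsx, rsPair]
      · have : (altScore x == s) = false := by simp [hsx]
        simp [List.filter_append, this, Ne.symm hsx]

theorem rank_sources_spec : Claim_equal_rank_sources := by
  intro urls _
  simp only [Spec_rank_sources, rank_sources, rank_sources_alt]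
  have hfold : urls.foldl (fun scored url =>
      let score : Int := 0
      let score := if PySem.Str.isIn "docs" url then score + 3 else score
      let score := if PySem.Str.isIn "github" url then score + 2 else score
      let score := if PySem.Str.isIn "api" url then score + 1 else score
      scored ++ [(url, score)]) [] = urls.map rsPair := by
    rw [PySem.List.foldl_append_singleton_eq_map]
    simp only [List.nil_append]
    apply List.map_congr_left
    intro u _
    simp only [rsPair, altScore, Prod.mk.injEq, true_and]
    split_ifs <;> omega
  rw [hfold, sorted_eq_buckets]
  have hr : PySem.List.pyRange 6 (-1) (-1) = ([6, 5, 4, 3, 2, 1, 0] : List Int) := by decide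
  rw [hr, PySem.List.foldl_append_eq_flatMap]
  simp only [List.nil_append]
  rw [List.map_flatMap]
  apply List.flatMap_congr
  intro s _
  rw [List.map_map, show ((fun (u : String × Int) => u.1) ∘ rsPair) = id from rfl, List.map_id]
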